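-- pv_equiv track=rewrite | github.com/kun005/ATTT_CODE | Bài tập/BAI_30.py | css
-- ===== SOURCE A (Python) =====
-- def css(s):
--     #1. đếm tần suất ký tự
--     f = {}
--     for c_val in s:
--         if c_val in f:
--             f[c_val] += 1
--         else:
--             f[c_val] = 1
--
--     t = 0
--     for char in f:
--         k_freq = f[char]
--         # công thức tính số chuỗi con với tần suất k lần
--         t = t + (k_freq * (k_freq + 1)) // 2
--
--     return t
-- ===== SOURCE B (Python) =====
-- def css(s):
--     # one fused pass: increment the running count of each char and add the
--     # new count to the total; sum 1+2+...+k == k*(k+1)//2 per character.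
--     count = {}
--     t = 0
--     for c in s:
--         k = count.get(c, 0) + 1
--         count[c] = k
--         t += k
--     return t
-- ===== Notes on version B (the rewrite author's own statement) =====
-- stated objective: simpler
-- what changed: A builds a full frequency table and then runs a second aggregation pass applying the closed formula k*(k+1)//2 per key; B fuses counting and summation into a single pass, adding each character's freshly incremented count to a running total, so the second loop and the formula disappear.
import Mathlib
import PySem

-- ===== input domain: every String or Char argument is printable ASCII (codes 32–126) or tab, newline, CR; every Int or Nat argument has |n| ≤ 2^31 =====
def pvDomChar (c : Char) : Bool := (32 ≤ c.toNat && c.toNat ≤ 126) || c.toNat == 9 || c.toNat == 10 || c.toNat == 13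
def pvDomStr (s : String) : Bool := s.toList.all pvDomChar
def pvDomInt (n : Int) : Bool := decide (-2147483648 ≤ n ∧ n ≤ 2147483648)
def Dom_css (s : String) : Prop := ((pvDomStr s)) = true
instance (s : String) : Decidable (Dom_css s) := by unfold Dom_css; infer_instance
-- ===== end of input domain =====

-- B fuses A's two passes (frequency table, then per-key formula k*(k+1)//2) into one
-- pass that adds each character's incremented running count to a total; objective: simpler.

-- ===== PORT A =====
def css (s : String) : Int :=
  let f := s.toList.foldl
    (fun (d : PySem.Dict Char Int) c =>
      if d.contains c then d.insert c (d.getD c 0 + 1) else d.insert c 1)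
    PySem.Dict.empty
  f.keys.foldl
    (fun t ch => t + PySem.Int.floordiv (f.getD ch 0 * (f.getD ch 0 + 1)) 2) 0

-- ===== PORT B =====
def css_alt (s : String) : Int :=
  (s.toList.foldl
    (fun (p : PySem.Dict Char Int × Int) c =>
      let k := p.1.getD c 0 + 1
      (p.1.insert c k, p.2 + k))
    (PySem.Dict.empty, 0)).2

-- ===== PRECONDITION & SPEC =====
def Spec_css (s : String) (out : Int) : Prop := out = css_alt s
instance (s : String) (out : Int) : Decidable (Spec_css s out) := by unfold Spec_css; infer_instance

-- ===== CLAIM (what is proved, stated in full; the proofs are below) =====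
def Claim_equal_css : Prop := ∀ (s : String), Dom_css s → Spec_css s (css s)

-- ===== LEMMAS AND PROOFS =====

-- triangular number by Python floor division, as both programs compute it
def tri (k : Int) : Int := PySem.Int.floordiv (k * (k + 1)) 2

theorem tri_succ (k : Int) : tri (k + 1) = tri k + (k + 1) := by
  unfold tri
  rw [PySem.Int.floordiv_eq_ediv_of_pos (by norm_num : (0:Int) < 2),
      PySem.Int.floordiv_eq_ediv_of_pos (by norm_num : (0:Int) < 2)]
  have h : (k + 1) * (k + 1 + 1) = k * (k + 1) + (k + 1) * 2 := by ring
  rw [h, Int.add_mul_ediv_right _ _ (by norm_num)]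

-- the canonical sum both programs compute: Σ over distinct chars of tri(count)
def triSum (l : List Char) : Int := ∑ x ∈ l.toFinset, tri (l.count x : Int)

theorem foldl_add_int (L : List Char) (f : Char → Int) (a : Int) :
    L.foldl (fun t x => t + f x) a = a + (L.map f).sum := by
  induction L generalizing a with
  | nil => simp
  | cons c L ih => simp [List.foldl_cons, ih, add_assoc]

-- A's counting loop is the PySem counter
theorem css_counter (l : List Char) :
    l.foldl
      (fun (d : PySem.Dict Char Int) c =>
        if d.contains c then d.insert c (d.getD c 0 + 1) else d.insert c 1)
      PySem.Dict.empty = PySem.Dict.counter l := by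
  have hstep :
      (fun (d : PySem.Dict Char Int) c =>
        if d.contains c then d.insert c (d.getD c 0 + 1) else d.insert c 1)
      = fun (d : PySem.Dict Char Int) c => d.insert c (d.getD c 0 + 1) := by
    funext d c
    by_cases h : d.contains c = true
    · simp [h]
    · have h' : d.contains c = false := by simpa using h
      rw [if_neg (by simp [h']), PySem.Dict.getD_of_not_contains d 0 h']
      norm_num
  rw [hstep, PySem.Dict.foldl_insert_getD_add_one_eq_counter]

theorem css_eq_triSum (s : String) : css s = triSum s.toList := by
  unfold css
  rw [css_counter]
  simp only [PySem.Dict.getD_counter, PySem.Dict.keys_counter]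
  rw [foldl_add_int _ (fun ch =>
        PySem.Int.floordiv ((s.toList.count ch : Int) * ((s.toList.count ch : Int) + 1)) 2)]
  rw [← List.sum_toFinset _ (PySem.Set.nodup_ofList s.toList)]
  have hfin : (PySem.Set.ofList s.toList).toFinset = s.toList.toFinset := by
    ext x
    simp [PySem.Set.mem_ofList]
  rw [hfin]
  simp [triSum, tri]

theorem triSum_append (l : List Char) (c : Char) :
    triSum (l ++ [c]) = triSum l + ((l.count c : Int) + 1) := by
  unfold triSum
  have hfin : (l ++ [c]).toFinset = insert c l.toFinset := by
    ext x; simp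
  have hcount : ∀ x, ((l ++ [c]).count x : Int)
      = (l.count x : Int) + (if c = x then 1 else 0) := by
    intro x
    by_cases h : c = x <;> simp [List.count_append, h]
  rw [hfin]
  by_cases hc : c ∈ l.toFinset
  · rw [Finset.insert_eq_self.mpr hc]
    rw [← Finset.sum_erase_add _ _ hc, ← Finset.sum_erase_add _ (fun x => tri (l.count x : Int)) hc]
    have hcongr : ∀ x ∈ l.toFinset.erase c,
        tri (((l ++ [c]).count x : Nat) : Int) = tri ((l.count x : Nat) : Int) := by
      intro x hx
      have hxc : x ≠ c := (Finset.mem_erase.mp hx).1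
      rw [hcount x, if_neg (fun h => hxc h.symm), add_zero]
    rw [Finset.sum_congr rfl hcongr, hcount c, if_pos rfl, tri_succ]
    ring
  · rw [Finset.sum_insert hc]
    have hcl : c ∉ l := fun h => hc (List.mem_toFinset.mpr h)
    have hc0 : l.count c = 0 := List.count_eq_zero.mpr hcl
    have hcongr : ∀ x ∈ l.toFinset,
        tri (((l ++ [c]).count x : Nat) : Int) = tri ((l.count x : Nat) : Int) := by
      intro x hx
      have hxc : c ≠ x := fun h => hc (h ▸ hx)
      rw [hcount x, if_neg hxc, add_zero]
    rw [Finset.sum_congr rfl hcongr, hcount c, if_pos rfl, hc0]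
    have : tri ((0 : Int) + 1) = 1 := by decide
    simp only [Nat.cast_zero] at *
    rw [this]
    ring

-- the dict component of B's fold, in isolation
theorem css_alt_fst (l : List Char) (d : PySem.Dict Char Int) (t : Int) :
    (l.foldl
      (fun (p : PySem.Dict Char Int × Int) c =>
        let k := p.1.getD c 0 + 1
        (p.1.insert c k, p.2 + k)) (d, t)).1
    = l.foldl (fun d c => d.insert c (d.getD c 0 + 1)) d := by
  induction l generalizing d t with
  | nil => rfl
  | cons c l ih => simp [List.foldl_cons, ih]

theorem css_alt_eq_triSum_aux (l : List Char) :
    (l.foldl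
      (fun (p : PySem.Dict Char Int × Int) c =>
        let k := p.1.getD c 0 + 1
        (p.1.insert c k, p.2 + k)) (PySem.Dict.empty, 0)).2 = triSum l := by
  induction l using List.reverseRecOn with
  | nil => simp [triSum]
  | append_singleton l c ih =>
    rw [List.foldl_append, triSum_append, ← ih]
    simp only [List.foldl_cons, List.foldl_nil]
    rw [css_alt_fst, PySem.Dict.foldl_insert_getD_add_one_eq_counter,
        PySem.Dict.getD_counter]

theorem css_alt_eq_triSum (s : String) : css_alt s = triSum s.toList :=
  css_alt_eq_triSum_aux s.toList

-- ===== VERDICT (by name: the statement is the Claim_ definition above) =====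
theorem css_spec : Claim_equal_css := by
  intro s _
  unfold Spec_css
  rw [css_eq_triSum, css_alt_eq_triSum]
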